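-- pv_equiv track=rewrite | github.com/lakenn/interview_questions | array/subStringsKDist.py | subStringsKDist
-- ===== SOURCE A (Python) =====
-- def check_all_diff(tokens):
--     eng_map = {}
--
--     for char in tokens:
--         eng_map[char] = eng_map.get(char, 0) + 1
--
--         if eng_map[char] > 1:
--             return False
--
--     return True
--
-- def subStringsKDist(inputStr, num):
--     # WRITE YOUR CODE HERE
--     total_len = len(inputStr)
--
--     sol = {}
--     for i in range(total_len):
--         if i + num <= total_len:
--             possible_ans = inputStr[i:i + num]
--
--             if check_all_diff(possible_ans):
--                 sol[possible_ans] = 1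
--
--     return sol.keys()
-- ===== SOURCE B (Python) =====
-- def subStringsKDist(inputStr, num):
--     # O(n): sliding last-occurrence window; start = smallest t with inputStr[t:j+1] all-distinct
--     if num < 1:
--         return []
--     last = {}
--     start = 0
--     sol = {}
--     for j, ch in enumerate(inputStr):
--         p = last.get(ch, -1)
--         if p >= start:
--             start = p + 1
--         last[ch] = j
--         if j - start + 1 >= num:
--             sol[inputStr[j + 1 - num: j + 1]] = 1
--     return list(sol)
-- ===== Notes on version B (the rewrite author's own statement) =====
-- stated objective: faster
-- what changed: Replaces the per-start rescan (slice each window and count its characters from scratch) by a single left-to-right pass keeping a last-occurrence map and a sliding window start, emitting a window exactly when it is long enough and all-distinct.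
-- intended difference: For num <= 0 on a nonempty string A returns accidental slice artifacts (the empty string, and for negative num substrings of unrelated lengths from Python's negative-end slicing), while B returns [], the intended answer since there are no substrings of positive length num. — e.g. on subStringsKDist("a", 0): A returns [""], B returns []
import Mathlib
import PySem

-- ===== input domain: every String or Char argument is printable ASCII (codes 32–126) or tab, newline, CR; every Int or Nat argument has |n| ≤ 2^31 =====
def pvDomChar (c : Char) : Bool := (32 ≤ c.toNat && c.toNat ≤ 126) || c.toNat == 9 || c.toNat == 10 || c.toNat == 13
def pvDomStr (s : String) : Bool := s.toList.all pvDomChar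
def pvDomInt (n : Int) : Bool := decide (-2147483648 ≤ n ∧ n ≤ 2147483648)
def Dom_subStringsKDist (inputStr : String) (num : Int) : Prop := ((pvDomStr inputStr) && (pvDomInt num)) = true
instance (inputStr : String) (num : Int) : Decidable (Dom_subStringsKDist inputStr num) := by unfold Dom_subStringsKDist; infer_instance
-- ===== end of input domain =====

-- B replaces A's per-start window rescan by one O(n) pass with a last-occurrence map and a sliding
-- window start; on num ≤ 0 (nonempty input) B intentionally returns [] where A returns slice artifacts (see D_).

-- ===== PORT A =====
-- helper check_all_diff: loop with the counting dict, early return False on a repeated char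
def cadGo (engMap : PySem.Dict Char Int) : List Char → Bool
  | [] => true
  | c :: rest =>
    let m := engMap.insert c (engMap.getD c 0 + 1)
    if m.getD c 0 > 1 then false else cadGo m rest

def check_all_diff (tokens : List Char) : Bool := cadGo PySem.Dict.empty tokens

def subStringsKDist (inputStr : String) (num : Int) : List String :=
  let cs := inputStr.toList
  let totalLen : Int := (cs.length : Int)
  let sol := (PySem.List.pyRange 0 totalLen 1).foldl
    (fun d i =>
      if i + num ≤ totalLen then
        let possibleAns := PySem.List.slice cs (some i) (some (i + num))
        if check_all_diff possibleAns then d.insert possibleAns 1 else d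
      else d)
    (PySem.Dict.empty : PySem.Dict (List Char) Int)
  sol.keys.map String.ofList

-- ===== PORT B =====
def subStringsKDist_alt (inputStr : String) (num : Int) : List String :=
  let cs := inputStr.toList
  if num < 1 then []
  else
    let st := (PySem.List.enumerate cs).foldl
      (fun (s : PySem.Dict Char Int × Int × PySem.Dict (List Char) Int) je =>
        let j := je.1
        let ch := je.2
        let p := s.1.getD ch (-1)
        let start := if p ≥ s.2.1 then p + 1 else s.2.1
        let last := s.1.insert ch j
        let sol := if j - start + 1 ≥ num then
            s.2.2.insert (PySem.List.slice cs (some (j + 1 - num)) (some (j + 1))) 1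
          else s.2.2
        (last, start, sol))
      ((PySem.Dict.empty : PySem.Dict Char Int), (0 : Int),
        (PySem.Dict.empty : PySem.Dict (List Char) Int))
    st.2.2.keys.map String.ofList

-- ===== PRECONDITION & SPEC =====
-- For num ≤ 0 on a nonempty string A returns accidental slice artifacts (the empty string and, for
-- negative num, substrings of unrelated lengths from Python's negative-end slicing), while B returns
-- [], the intended answer since there are no substrings of positive length num.
def D_subStringsKDist (inputStr : String) (num : Int) : Prop := num ≤ 0 ∧ inputStr.toList ≠ []
instance (inputStr : String) (num : Int) : Decidable (D_subStringsKDist inputStr num) := by unfold D_subStringsKDist; infer_instance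

def Spec_subStringsKDist (inputStr : String) (num : Int) (out : List String) : Prop :=
  ¬ D_subStringsKDist inputStr num → out = subStringsKDist_alt inputStr num
instance (inputStr : String) (num : Int) (out : List String) : Decidable (Spec_subStringsKDist inputStr num out) := by unfold Spec_subStringsKDist; infer_instance

def pvDiffWitness_subStringsKDist : String × Int := ("a", 0)
def pvDiffWitnessOut_subStringsKDist : (List String) × (List String) := ([""], [])

-- ===== CLAIM (what is proved, stated in full; the proofs are below) =====
def Claim_unchanged_subStringsKDist : Prop := ∀ (inputStr : String) (num : Int), Dom_subStringsKDist inputStr num → Spec_subStringsKDist inputStr num (subStringsKDist inputStr num)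
def Claim_changed_subStringsKDist : Prop := Dom_subStringsKDist (pvDiffWitness_subStringsKDist.1) (pvDiffWitness_subStringsKDist.2) ∧ D_subStringsKDist (pvDiffWitness_subStringsKDist.1) (pvDiffWitness_subStringsKDist.2) ∧ subStringsKDist (pvDiffWitness_subStringsKDist.1) (pvDiffWitness_subStringsKDist.2) = pvDiffWitnessOut_subStringsKDist.1 ∧ subStringsKDist_alt (pvDiffWitness_subStringsKDist.1) (pvDiffWitness_subStringsKDist.2) = pvDiffWitnessOut_subStringsKDist.2 ∧ pvDiffWitnessOut_subStringsKDist.1 ≠ pvDiffWitnessOut_subStringsKDist.2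
def Claim_exact_subStringsKDist : Prop := ∀ (inputStr : String) (num : Int), Dom_subStringsKDist inputStr num → D_subStringsKDist inputStr num → subStringsKDist inputStr num ≠ subStringsKDist_alt inputStr num

-- ===== LEMMAS AND PROOFS =====

theorem pvFilterMapTrunc {α : Type} (f : Nat → Option α) (m n : Nat) (hm : m ≤ n)
    (hf : ∀ i, m ≤ i → i < n → f i = none) :
    (List.range n).filterMap f = (List.range m).filterMap f := by
  induction n, hm using Nat.le_induction with
  | base => rfl
  | succ n hmn ih =>
    rw [List.range_succ, List.filterMap_append]
    simp [hf n hmn (by omega), ih (fun i h1 h2 => hf i h1 (by omega))]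

theorem pvFilterMapShift {α : Type} (f : Nat → Option α) (k n : Nat) :
    (List.range n).filterMap (fun j => if k ≤ j then f (j - k) else none)
      = (List.range (n - k)).filterMap f := by
  induction n with
  | zero => simp
  | succ n ih =>
    rw [List.range_succ, List.filterMap_append, ih]
    by_cases hk : k ≤ n
    · have : n + 1 - k = (n - k) + 1 := by omega
      rw [this, List.range_succ, List.filterMap_append]
      simp only [List.filterMap_cons, List.filterMap_nil, hk, if_true]
    · have h0 : n + 1 - k = 0 := by omega
      have h1 : n - k = 0 := by omega
      simp [h0, h1, hk]

theorem pvFilterMapOfFilter {α β : Type} (p : α → Bool) (f : α → β) (l : List α) :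
    (l.filter p).map f = l.filterMap (fun x => if p x then some (f x) else none) := by
  induction l with
  | nil => rfl
  | cons x t ih => by_cases h : p x <;> simp [h, ih]

theorem pvCadGoCounter (tokens : List Char) : ∀ (pre : List Char), pre.Nodup →
    cadGo (PySem.Dict.counter pre) tokens = decide (pre ++ tokens).Nodup := by
  induction tokens with
  | nil => intro pre h; simpa [cadGo] using h
  | cons c rest ih =>
    intro pre h
    have hm : (PySem.Dict.counter pre).insert c ((PySem.Dict.counter pre).getD c 0 + 1)
        = PySem.Dict.counter (pre ++ [c]) := by
      rw [PySem.Dict.counter_append_singleton]; rfl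
    have hget : (PySem.Dict.counter (pre ++ [c])).getD c 0 = ((pre.count c : Int) + 1) := by
      rw [PySem.Dict.getD_counter]; simp
    by_cases hc : c ∈ pre
    · have hcnt : 0 < pre.count c := List.count_pos_iff.mpr hc
      have : ¬ (pre ++ c :: rest).Nodup := by
        intro hnd
        rcases List.nodup_append.mp hnd with ⟨_, _, hdisj⟩
        exact hdisj c hc c (by simp) rfl
      simp only [cadGo, hm, hget, this]
      rw [if_pos (by omega)]
      simp
    · have hcnt : pre.count c = 0 := List.count_eq_zero.mpr hc
      have hnd' : (pre ++ [c]).Nodup := by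
        rw [List.nodup_append]
        exact ⟨h, List.nodup_singleton c, by rintro a ha b hb rfl; simp at hb; subst hb; exact hc ha⟩
      simp only [cadGo, hm, hget, hcnt]
      rw [if_neg (by omega)]
      rw [ih (pre ++ [c]) hnd']
      simp

theorem pvCheckAllDiff (tokens : List Char) : check_all_diff tokens = decide tokens.Nodup := by
  have := pvCadGoCounter tokens [] (List.nodup_nil)
  simpa [check_all_diff] using this

def LastInv (l : List Char) (d : PySem.Dict Char Int) : Prop :=
  (∀ c : Char, d.getD c (-1) < (l.length : Int)) ∧
  (∀ (c : Char) (t : Nat), t ≤ l.length → (c ∈ l.drop t ↔ (t : Int) ≤ d.getD c (-1)))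

def StartInv (l : List Char) (start : Int) : Prop :=
  0 ≤ start ∧ ∀ t : Nat, t ≤ l.length → ((l.drop t).Nodup ↔ start ≤ (t : Int))

theorem pvLastInvStep (l : List Char) (d : PySem.Dict Char Int) (c : Char)
    (h : LastInv l d) : LastInv (l ++ [c]) (d.insert c (l.length : Int)) := by
  obtain ⟨hb, hi⟩ := h
  constructor
  · intro c'
    by_cases hc : c' = c
    · subst hc; rw [PySem.Dict.getD_insert_self]; simp
    · rw [PySem.Dict.getD_insert_of_ne _ _ _ hc]
      have := hb c'; simp; omega
  · intro c' t ht
    simp only [List.length_append, List.length_cons, List.length_nil] at ht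
    by_cases hc : c' = c
    · subst hc
      rw [PySem.Dict.getD_insert_self]
      by_cases ht' : t ≤ l.length
      · rw [List.drop_append_of_le_length ht']
        simp
        omega
      · have : t = l.length + 1 := by omega
        subst this
        simp
    · rw [PySem.Dict.getD_insert_of_ne _ _ _ hc]
      by_cases ht' : t ≤ l.length
      · rw [List.drop_append_of_le_length ht']
        have := hi c' t ht'
        simp only [List.mem_append, List.mem_singleton]
        constructor
        · rintro (hmem | rfl)
          · exact this.mp hmem
          · exact absurd rfl hc
        · intro hle; exact Or.inl (this.mpr hle)
      · have : t = l.length + 1 := by omega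
        subst this
        have := hb c'
        simp
        omega

theorem pvStartInvStep (l : List Char) (d : PySem.Dict Char Int) (c : Char) (start : Int)
    (hl : LastInv l d) (hs : StartInv l start) :
    StartInv (l ++ [c]) (if d.getD c (-1) ≥ start then d.getD c (-1) + 1 else start) := by
  obtain ⟨hb, hi⟩ := hl
  obtain ⟨h0, hiff⟩ := hs
  have hsl : start ≤ (l.length : Int) := by
    have := (hiff l.length (le_refl _)).mp (by simp)
    exact this
  constructor
  · split_ifs with hp <;> omega
  · intro t ht
    simp only [List.length_append, List.length_cons, List.length_nil] at ht
    by_cases ht' : t ≤ l.length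
    · rw [List.drop_append_of_le_length ht']
      have hnd : ((l.drop t) ++ [c]).Nodup ↔ (l.drop t).Nodup ∧ c ∉ l.drop t := by
        rw [List.nodup_append]
        constructor
        · rintro ⟨h1, _, h3⟩
          exact ⟨h1, fun hmem => h3 c hmem c (by simp) rfl⟩
        · rintro ⟨h1, h2⟩
          exact ⟨h1, List.nodup_singleton c, by rintro a ha b hb rfl; simp at hb; subst hb; exact h2 ha⟩
      rw [hnd, hiff t ht', hi c t ht']
      have := hb c
      split_ifs with hp <;> constructor <;> intro <;> omega
    · have : t = l.length + 1 := by omega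
      subst this
      have hd : (l ++ [c]).drop (l.length + 1) = [] := by
        apply List.drop_eq_nil_of_le; simp
      rw [hd]
      simp only [List.nodup_nil, true_iff]
      have := hb c
      split_ifs with hp <;> omega

def pvW (cs : List Char) (ν : Nat) (j : Nat) : List Char := (cs.take (j+1)).drop (j+1-ν)

def pvEmitF (cs : List Char) (ν : Nat) : Nat → Option (List Char) := fun j =>
  if (ν ≤ j+1 ∧ (pvW cs ν j).Nodup) then some (pvW cs ν j) else none

theorem pvLoopB (cs : List Char) (ν : Nat) :
    ∀ (suf pre : List Char) (d : PySem.Dict Char Int) (start : Int)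
      (sol : PySem.Dict (List Char) Int),
      pre ++ suf = cs → LastInv pre d → StartInv pre start →
      ((PySem.List.enumerate suf (pre.length : Int)).foldl
        (fun (s : PySem.Dict Char Int × Int × PySem.Dict (List Char) Int) je =>
          let j := je.1
          let ch := je.2
          let p := s.1.getD ch (-1)
          let start := if p ≥ s.2.1 then p + 1 else s.2.1
          let last := s.1.insert ch j
          let sol := if j - start + 1 ≥ (ν : Int) then
              s.2.2.insert (PySem.List.slice cs (some (j + 1 - (ν : Int))) (some (j + 1))) 1
            else s.2.2
          (last, start, sol)) (d, start, sol)).2.2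
      = ((List.range' pre.length suf.length).filterMap (pvEmitF cs ν)).foldl
          (fun so w => so.insert w 1) sol := by
  intro suf
  induction suf with
  | nil =>
    intro pre d start sol _ _ _
    simp [PySem.List.enumerate]
  | cons c rest ih =>
    intro pre d start sol hcs hl hs
    have henum : PySem.List.enumerate (c :: rest) (pre.length : Int)
        = ((pre.length : Int), c) :: PySem.List.enumerate rest ((pre.length : Int) + 1) := by
      simp [PySem.List.enumerate]
    rw [henum, List.foldl_cons]
    set L := pre.length with hL
    -- the new state after one step
    have hpre' : pre ++ [c] = cs.take (L + 1) := by
      rw [← hcs]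
      rw [show pre ++ c :: rest = (pre ++ [c]) ++ rest by simp]
      rw [show L + 1 = (pre ++ [c]).length by simp [hL]]
      exact (List.take_left).symm
    have hl' : LastInv (pre ++ [c]) (d.insert c (L : Int)) := pvLastInvStep pre d c hl
    have hs' : StartInv (pre ++ [c])
        (if d.getD c (-1) ≥ start then d.getD c (-1) + 1 else start) := pvStartInvStep pre d c start hl hs
    set start' := if d.getD c (-1) ≥ start then d.getD c (-1) + 1 else start with hstart'
    have hWeq : pvW cs ν L = (pre ++ [c]).drop (L + 1 - ν) := by
      rw [pvW, ← hpre']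
    have hcond : ((L : Int) - start' + 1 ≥ (ν : Int)) ↔ (ν ≤ L + 1 ∧ (pvW cs ν L).Nodup) := by
      by_cases hν1 : ν ≤ L + 1
      · have ht : L + 1 - ν ≤ (pre ++ [c]).length := by simp; omega
        have := hs'.2 (L + 1 - ν) ht
        rw [hWeq]
        constructor
        · intro hge
          refine ⟨hν1, this.mpr ?_⟩
          omega
        · rintro ⟨_, hnd⟩
          have := this.mp hnd
          push_cast at this
          omega
      · have h0 : 0 ≤ start' := hs'.1
        constructor
        · intro hge; omega
        · rintro ⟨h1, _⟩; omega
    have hval : (ν ≤ L + 1) →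
        PySem.List.slice cs (some ((L : Int) + 1 - (ν : Int))) (some ((L : Int) + 1))
          = pvW cs ν L := by
      intro hν1
      have e1 : (L : Int) + 1 - (ν : Int) = ((L + 1 - ν : Nat) : Int) := by omega
      have e2 : (L : Int) + 1 = ((L + 1 : Nat) : Int) := by push_cast; ring
      rw [e1, e2, PySem.List.slice_natCast, pvW, List.drop_take]
    have hsol' : (if (L : Int) - start' + 1 ≥ (ν : Int) then
          sol.insert (PySem.List.slice cs (some ((L : Int) + 1 - (ν : Int))) (some ((L : Int) + 1))) 1
        else sol)
        = (List.filterMap (pvEmitF cs ν) [L]).foldl (fun so w => so.insert w 1) sol := by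
      simp only [List.filterMap_cons, List.filterMap_nil, pvEmitF]
      by_cases he : (ν ≤ L + 1 ∧ (pvW cs ν L).Nodup)
      · rw [if_pos (hcond.mpr he), if_pos he, hval he.1]
        simp
      · rw [if_neg (fun hh => he (hcond.mp hh)), if_neg he]
        simp
    have hrange : List.range' L (rest.length + 1) = L :: List.range' (L + 1) rest.length := by
      rw [List.range'_succ]
    have hcs' : (pre ++ [c]) ++ rest = cs := by rw [← hcs]; simp
    show (List.foldl
        (fun (s : PySem.Dict Char Int × Int × PySem.Dict (List Char) Int) je =>
          let j := je.1
          let ch := je.2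
          let p := s.1.getD ch (-1)
          let start := if p ≥ s.2.1 then p + 1 else s.2.1
          let last := s.1.insert ch j
          let sol := if j - start + 1 ≥ (ν : Int) then
              s.2.2.insert (PySem.List.slice cs (some (j + 1 - (ν : Int))) (some (j + 1))) 1
            else s.2.2
          (last, start, sol))
        (d.insert c (L : Int), start',
          (if (L : Int) - start' + 1 ≥ (ν : Int) then
            sol.insert (PySem.List.slice cs (some ((L : Int) + 1 - (ν : Int))) (some ((L : Int) + 1))) 1
          else sol))
        (PySem.List.enumerate rest ((L : Int) + 1))).2.2 = _
    rw [show ((L : Int) + 1) = (((pre ++ [c]).length : Nat) : Int) by simp [hL]]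
    rw [ih (pre ++ [c]) _ _ _ hcs' hl' hs']
    rw [show (pre ++ [c]).length = L + 1 by simp [hL]]
    push_cast
    rw [show (c :: rest).length = rest.length + 1 by simp, hrange]
    rw [show List.filterMap (pvEmitF cs ν) (L :: List.range' (L + 1) rest.length)
        = List.filterMap (pvEmitF cs ν) [L] ++ List.filterMap (pvEmitF cs ν) (List.range' (L + 1) rest.length) by
      rw [← List.filterMap_append]
      rfl]
    rw [List.foldl_append, ← hsol']

def pvFA (cs : List Char) (ν : Nat) : Nat → Option (List Char) := fun i =>
  if (i + ν ≤ cs.length ∧ ((cs.drop i).take ν).Nodup) then some ((cs.drop i).take ν) else none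

theorem pvAKeys (s : String) (ν : Nat) :
    subStringsKDist s (ν : Int)
      = (PySem.Set.ofList ((List.range s.toList.length).filterMap (pvFA s.toList ν))).map
          String.ofList := by
  unfold subStringsKDist
  simp only []
  set cs := s.toList with hcs
  rw [PySem.List.pyRange_zero_natCast, List.foldl_map]
  have hbody : ∀ (d : PySem.Dict (List Char) Int) (k : Nat), k ∈ List.range cs.length →
      (if (k : Int) + (ν : Int) ≤ (cs.length : Int) then
        (if check_all_diff (PySem.List.slice cs (some (k : Int)) (some ((k : Int) + (ν : Int)))) then
          d.insert (PySem.List.slice cs (some (k : Int)) (some ((k : Int) + (ν : Int)))) 1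
        else d)
      else d)
      = (if (k + ν ≤ cs.length ∧ ((cs.drop k).take ν).Nodup) then d.insert ((cs.drop k).take ν) 1 else d) := by
    intro d k _
    have hsl : PySem.List.slice cs (some (k : Int)) (some ((k : Int) + (ν : Int)))
        = (cs.drop k).take ν := PySem.List.slice_natCast_add cs k ν
    rw [hsl, pvCheckAllDiff]
    by_cases hc : k + ν ≤ cs.length
    · rw [if_pos (by exact_mod_cast hc)]
      by_cases hn : ((cs.drop k).take ν).Nodup
      · rw [if_pos (by simpa using hn), if_pos ⟨hc, hn⟩]
      · rw [if_neg (by simpa using hn), if_neg (fun hh => hn hh.2)]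
    · rw [if_neg (by omega), if_neg (fun hh => hc hh.1)]
  have hfold := PySem.List.foldl_congr_mem (List.range cs.length)
    (fun d k => if (k : Int) + (ν : Int) ≤ (cs.length : Int) then
        (if check_all_diff (PySem.List.slice cs (some (k : Int)) (some ((k : Int) + (ν : Int)))) then
          d.insert (PySem.List.slice cs (some (k : Int)) (some ((k : Int) + (ν : Int)))) (1 : Int)
        else d)
      else d)
    (fun d k => if (k + ν ≤ cs.length ∧ ((cs.drop k).take ν).Nodup) then d.insert ((cs.drop k).take ν) (1 : Int) else d)
    PySem.Dict.empty hbody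
  rw [hfold]
  rw [PySem.List.foldl_ite_eq_foldl_filter]
  rw [PySem.Dict.keys_foldl_insert_key
    (l := (List.range cs.length).filter
      (fun k => decide (k + ν ≤ cs.length ∧ ((cs.drop k).take ν).Nodup)))
    (key := fun k => (cs.drop k).take ν) (f := fun _ _ => 1) (d := PySem.Dict.empty)]
  rw [PySem.Dict.keys_empty]
  have hset : ∀ l : List (List Char), PySem.Set.update ([] : PySem.Set (List Char)) l = PySem.Set.ofList l := by
    intro l; rfl
  rw [hset]
  congr 1
  rw [pvFilterMapOfFilter]
  congr 1
  apply List.filterMap_congr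
  intro k _
  unfold pvFA
  split_ifs with h1 h2 h3 <;> first | rfl | (exfalso; simp at h1; tauto)

theorem pvEeqFA (cs : List Char) (ν : Nat) (hν : 1 ≤ ν) :
    (List.range cs.length).filterMap (pvEmitF cs ν)
      = (List.range cs.length).filterMap (pvFA cs ν) := by
  obtain ⟨μ, rfl⟩ : ∃ μ, ν = μ + 1 := ⟨ν - 1, by omega⟩
  have h1 : (List.range cs.length).filterMap (pvEmitF cs (μ + 1))
      = (List.range cs.length).filterMap
          (fun j => if μ ≤ j then pvFA cs (μ + 1) (j - μ) else none) := by
    apply List.filterMap_congr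
    intro j hj
    rw [List.mem_range] at hj
    unfold pvEmitF pvFA
    by_cases hb : μ ≤ j
    · rw [if_pos hb]
      have hW : pvW cs (μ + 1) j = (cs.drop (j - μ)).take (μ + 1) := by
        rw [pvW, show j + 1 - (μ + 1) = j - μ from by omega, List.drop_take,
          show j + 1 - (j - μ) = μ + 1 from by omega]
      rw [hW]
      have h2 : μ + 1 ≤ j + 1 := by omega
      have h3 : j - μ + (μ + 1) ≤ cs.length := by omega
      simp [h2, h3]
    · rw [if_neg hb, if_neg (by intro hh; omega)]
  rw [h1, pvFilterMapShift]
  rw [pvFilterMapTrunc (pvFA cs (μ + 1)) (cs.length - μ) cs.length (by omega)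
    (fun i hA hB => by unfold pvFA; rw [if_neg]; intro hh; exact absurd hh.1 (by omega))]

theorem pvLastInvNil : LastInv [] PySem.Dict.empty := by
  constructor
  · intro c; rw [PySem.Dict.getD_empty]; simp
  · intro c t ht
    simp only [List.length_nil, Nat.le_zero] at ht
    subst ht
    simp [PySem.Dict.getD_empty]

theorem pvStartInvNil : StartInv [] 0 := by
  constructor
  · omega
  · intro t ht
    simp only [List.length_nil, Nat.le_zero] at ht
    subst ht
    simp

theorem pvMainEq (s : String) (num : Int) (h : 1 ≤ num) :
    subStringsKDist s num = subStringsKDist_alt s num := by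
  obtain ⟨ν, rfl⟩ : ∃ ν : Nat, num = (ν : Int) := ⟨num.toNat, by omega⟩
  have hν : 1 ≤ ν := by exact_mod_cast h
  rw [pvAKeys]
  unfold subStringsKDist_alt
  simp only []
  rw [if_neg (show ¬((ν : Int) < 1) by omega)]
  set cs := s.toList with hcs
  have hloop := pvLoopB cs ν cs [] PySem.Dict.empty 0 PySem.Dict.empty (by simp)
    pvLastInvNil pvStartInvNil
  simp only [List.length_nil, Nat.cast_zero] at hloop
  rw [hloop]
  have hkeys := PySem.Dict.keys_foldl_insert
    (l := (List.range' 0 cs.length).filterMap (pvEmitF cs ν))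
    (f := fun _ _ => (1 : Int)) (d := PySem.Dict.empty)
  rw [hkeys, PySem.Dict.keys_empty]
  rw [show (List.range' 0 cs.length) = List.range cs.length from List.range_eq_range'.symm]
  rw [pvEeqFA cs ν hν]
  rfl

theorem pvEmptyEq (s : String) (num : Int) (h : s.toList = []) :
    subStringsKDist s num = subStringsKDist_alt s num := by
  unfold subStringsKDist subStringsKDist_alt
  rw [h]
  simp [PySem.List.enumerate]

theorem pvSliceNil (cs : List Char) (a b : Int) (h1 : b ≤ a) (h2 : 0 ≤ a)
    (h3 : a ≤ (cs.length : Int)) (h4 : 0 ≤ b ∨ (cs.length : Int) + b ≤ a) :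
    PySem.List.slice cs (some a) (some b) = [] := by
  have hmono : PySem.List.clampIdx cs.length b ≤ PySem.List.clampIdx cs.length a := by
    simp only [PySem.List.clampIdx]
    split_ifs <;> omega
  have h0 : PySem.List.clampIdx cs.length b - PySem.List.clampIdx cs.length a = 0 := by omega
  simp only [PySem.List.slice, h0, List.take_zero]

theorem pvTight (s : String) (num : Int) (hn : num ≤ 0) (hne : s.toList ≠ []) :
    subStringsKDist s num ≠ subStringsKDist_alt s num := by
  have halt : subStringsKDist_alt s num = [] := by
    unfold subStringsKDist_alt
    rw [if_pos (by omega)]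
  rw [halt]
  unfold subStringsKDist
  simp only []
  set cs := s.toList with hcs
  rw [PySem.List.pyRange_zero_natCast, List.foldl_map]
  have hbody : ∀ (d : PySem.Dict (List Char) Int) (k : Nat), k ∈ List.range cs.length →
      (if (k : Int) + num ≤ (cs.length : Int) then
        (if check_all_diff (PySem.List.slice cs (some (k : Int)) (some ((k : Int) + num))) then
          d.insert (PySem.List.slice cs (some (k : Int)) (some ((k : Int) + num))) (1 : Int)
        else d)
      else d)
      = (if ((k : Int) + num ≤ (cs.length : Int) ∧
            check_all_diff (PySem.List.slice cs (some (k : Int)) (some ((k : Int) + num))) = true) then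
          d.insert (PySem.List.slice cs (some (k : Int)) (some ((k : Int) + num))) (1 : Int)
        else d) := by
    intro d k _
    split_ifs with h1 h2 h3 <;> first | rfl | (exfalso; tauto)
  have hfold := PySem.List.foldl_congr_mem (List.range cs.length)
    (fun d k => if (k : Int) + num ≤ (cs.length : Int) then
        (if check_all_diff (PySem.List.slice cs (some (k : Int)) (some ((k : Int) + num))) then
          d.insert (PySem.List.slice cs (some (k : Int)) (some ((k : Int) + num))) (1 : Int)
        else d)
      else d)
    (fun d k => if ((k : Int) + num ≤ (cs.length : Int) ∧
            check_all_diff (PySem.List.slice cs (some (k : Int)) (some ((k : Int) + num))) = true) then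
          d.insert (PySem.List.slice cs (some (k : Int)) (some ((k : Int) + num))) (1 : Int)
        else d)
    PySem.Dict.empty hbody
  rw [hfold, PySem.List.foldl_ite_eq_foldl_filter]
  rw [PySem.Dict.keys_foldl_insert_key
    (l := (List.range cs.length).filter
      (fun k : Nat => decide ((k : Int) + num ≤ (cs.length : Int) ∧
        check_all_diff (PySem.List.slice cs (some (k : Int)) (some ((k : Int) + num))) = true)))
    (key := fun k : Nat => PySem.List.slice cs (some (k : Int)) (some ((k : Int) + num)))
    (f := fun _ _ => (1 : Int)) (d := PySem.Dict.empty)]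
  rw [PySem.Dict.keys_empty]
  intro hcontra
  have hlen : 1 ≤ cs.length := by
    cases hcl : cs with
    | nil => exact absurd hcl hne
    | cons a t => simp
  set k0 := cs.length - 1 with hk0
  have hsl : PySem.List.slice cs (some (k0 : Int)) (some ((k0 : Int) + num)) = [] := by
    refine pvSliceNil cs _ _ (by omega) (by omega) (by omega) ?_
    by_cases hb : 0 ≤ (k0 : Int) + num
    · exact Or.inl hb
    · refine Or.inr ?_
      omega
  have hmem : k0 ∈ (List.range cs.length).filter
      (fun k : Nat => decide ((k : Int) + num ≤ (cs.length : Int) ∧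
        check_all_diff (PySem.List.slice cs (some (k : Int)) (some ((k : Int) + num))) = true)) := by
    rw [List.mem_filter]
    refine ⟨List.mem_range.mpr (by omega), ?_⟩
    rw [decide_eq_true_eq]
    refine ⟨by omega, ?_⟩
    rw [hsl]
    rfl
  have hmem2 : ([] : List Char) ∈ PySem.Set.update ([] : PySem.Set (List Char))
      (((List.range cs.length).filter
      (fun k : Nat => decide ((k : Int) + num ≤ (cs.length : Int) ∧
        check_all_diff (PySem.List.slice cs (some (k : Int)) (some ((k : Int) + num))) = true))).map
        (fun k : Nat => PySem.List.slice cs (some (k : Int)) (some ((k : Int) + num)))) := by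
    rw [show PySem.Set.update ([] : PySem.Set (List Char)) _ = PySem.Set.ofList _ from rfl]
    rw [PySem.Set.mem_ofList]
    rw [List.mem_map]
    exact ⟨k0, hmem, hsl⟩
  have hmem3 := List.mem_map_of_mem (f := String.ofList) hmem2
  rw [hcontra] at hmem3
  simp at hmem3

-- ===== VERDICT (by name: the statement is the Claim_ definition above) =====
theorem subStringsKDist_spec : Claim_unchanged_subStringsKDist := by
  intro s num _ hD
  unfold D_subStringsKDist at hD
  by_cases h1 : 1 ≤ num
  · exact pvMainEq s num h1
  · refine pvEmptyEq s num ?_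
    by_contra hne
    exact hD ⟨by omega, hne⟩

theorem subStringsKDist_changed : Claim_changed_subStringsKDist := by
  unfold Claim_changed_subStringsKDist; decide

theorem subStringsKDist_tight : Claim_exact_subStringsKDist := by
  intro s num _ hD
  exact pvTight s num hD.1 hD.2
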